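-- pv_equiv track=rewrite | github.com/erauner/homelab-task-python | src/homelab_taskkit/context_rules.py | validate_context_vars
-- ===== SOURCE A (Python) =====
-- from typing import Any
--
-- GLOBAL_PREFIXES = ("pipeline.", "idempotency.")
--
-- def validate_context_vars(context_vars: dict[str, Any]) -> list[str]:
--     """Validate all context variables follow naming rules.
--
--     This is a diagnostic function to check existing context.
--     Returns list of warnings (not errors) for flexibility.
--
--     Args:
--         context_vars: The vars dict from a TaskkitContext.
--
--     Returns:
--         List of warning messages for any non-compliant keys.
--     """
--     warnings = []
--     known_task_prefixes = {
--         "echo.",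
--         "http_request.",
--         "json_transform.",
--         "conditional_check.",
--         "webhook_notify.",
--     }
--     all_known_prefixes = known_task_prefixes | set(GLOBAL_PREFIXES)
--
--     for key in context_vars:
--         if not isinstance(key, str):
--             warnings.append(f"Non-string key in context: {key!r}")
--             continue
--
--         # Check if key matches any known prefix
--         has_known_prefix = any(key.startswith(prefix) for prefix in all_known_prefixes)
--         # Warn if key has no known prefix and is not namespaced (missing dot)
--         if not has_known_prefix and "." not in key:
--             warnings.append(f"Context key '{key}' is not namespaced (missing '.')")
--
--     return warnings
-- ===== SOURCE B (Python) =====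
-- def validate_context_vars(context_vars):
--     """Validate all context variables follow naming rules.
--
--     Every known prefix contains a '.', so a key without a '.' can never
--     carry a known prefix: the warning condition reduces to '.' not in key.
--     """
--     return [
--         f"Non-string key in context: {key!r}"
--         if not isinstance(key, str)
--         else f"Context key '{key}' is not namespaced (missing '.')"
--         for key in context_vars
--         if not isinstance(key, str) or "." not in key
--     ]
-- ===== Notes on version B (the rewrite author's own statement) =====
-- stated objective: simpler
-- what changed: B drops the known-prefix set, the union with GLOBAL_PREFIXES and the any(key.startswith(...)) inner scan entirely (every known prefix contains a '.', so a dotless key can never match one) and produces the warnings as a single list comprehension guarded only by '.' not in key.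
import Mathlib
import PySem

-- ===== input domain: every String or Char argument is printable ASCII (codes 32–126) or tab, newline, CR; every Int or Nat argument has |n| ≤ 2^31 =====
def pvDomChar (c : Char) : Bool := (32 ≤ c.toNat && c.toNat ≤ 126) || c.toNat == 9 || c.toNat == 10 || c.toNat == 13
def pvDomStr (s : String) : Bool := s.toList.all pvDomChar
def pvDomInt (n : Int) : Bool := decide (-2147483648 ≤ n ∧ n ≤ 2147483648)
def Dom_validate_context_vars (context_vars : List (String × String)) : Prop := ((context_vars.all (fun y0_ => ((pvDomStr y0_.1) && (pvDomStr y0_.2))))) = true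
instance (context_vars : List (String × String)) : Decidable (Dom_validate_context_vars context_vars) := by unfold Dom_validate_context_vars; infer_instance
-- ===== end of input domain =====

-- B drops the known-prefix set and the any(startswith) inner scan (every known prefix contains a '.') and
-- emits the warnings as a single comprehension guarded by '.' not in key: simpler, same outputs.
-- Keys are Strings under the type convention, so A's non-string branch is unreachable in the ports.

-- ===== PORT A =====
-- known_task_prefixes | set(GLOBAL_PREFIXES) (set membership only feeds `any`, so order is immaterial)
def pvAllKnownPrefixes : List String :=
  ["echo.", "http_request.", "json_transform.", "conditional_check.", "webhook_notify.",
   "pipeline.", "idempotency."]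

def validate_context_vars (context_vars : List (String × String)) : List String :=
  context_vars.foldl (fun warnings kv =>
    let key := kv.1
    let has_known_prefix := pvAllKnownPrefixes.any (fun prefix_ => PySem.Str.startswith key prefix_)
    if !has_known_prefix && !(PySem.Str.isIn "." key) then
      warnings ++ ["Context key '" ++ key ++ "' is not namespaced (missing '.')"]
    else warnings) []

-- ===== PORT B =====
def validate_context_vars_alt (context_vars : List (String × String)) : List String :=
  context_vars.filterMap (fun kv =>
    if PySem.Str.isIn "." kv.1 then none
    else some ("Context key '" ++ kv.1 ++ "' is not namespaced (missing '.')"))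

-- ===== PRECONDITION & SPEC =====
def Spec_validate_context_vars (context_vars : List (String × String)) (out : List String) : Prop := out = validate_context_vars_alt context_vars
instance (context_vars : List (String × String)) (out : List String) : Decidable (Spec_validate_context_vars context_vars out) := by unfold Spec_validate_context_vars; infer_instance

-- ===== CLAIM (what is proved, stated in full; the proofs are below) =====
def Claim_equal_validate_context_vars : Prop := ∀ (context_vars : List (String × String)), Dom_validate_context_vars context_vars → Spec_validate_context_vars context_vars (validate_context_vars context_vars)

-- ===== LEMMAS AND PROOFS =====

-- a key with no '.' cannot start with any known prefix (each prefix contains a '.')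
theorem pv_no_dot_no_prefix (key : List Char) (h : PySem.Chars.isIn ['.'] key = false) :
    ∀ p ∈ pvAllKnownPrefixes, PySem.Chars.startswith key p.toList = false := by
  intro p hp
  rw [Bool.eq_false_iff]
  intro hsw
  rw [PySem.Chars.startswith_iff] at hsw
  have hdot : '.' ∈ key := hsw.mem (by fin_cases hp <;> decide)
  obtain ⟨s, t, hst⟩ := List.append_of_mem hdot
  rw [PySem.Chars.isIn_eq_false_iff] at h
  exact h ⟨s, t, by simp [hst]⟩

theorem pv_main (cv : List (String × String)) :
    validate_context_vars cv = validate_context_vars_alt cv := by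
  unfold validate_context_vars validate_context_vars_alt
  induction cv using List.reverseRecOn with
  | nil => rfl
  | append_singleton xs kv ih =>
      rw [List.foldl_append, List.filterMap_append, ih]
      simp only [List.foldl_cons, List.foldl_nil, List.filterMap_cons, List.filterMap_nil]
      by_cases hdot : PySem.Chars.isIn ['.'] kv.1.toList = true
      · simp [hdot]
      · rw [Bool.not_eq_true] at hdot
        simp [hdot]
        exact pv_no_dot_no_prefix kv.1.toList hdot

-- ===== VERDICT (by name: the statement is the Claim_ definition above) =====
theorem validate_context_vars_spec : Claim_equal_validate_context_vars := by
  intro cv _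
  exact pv_main cv
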